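-- pv_equiv track=rewrite | github.com/BojoteX/CockpitOS | Debug Tools/PLAY_DCS_stream.py | analyze_frames
-- ===== SOURCE A (Python) =====
-- def analyze_frames(frames, threshold):
--     """Scan frames and return (oversized_count, max_frame_size) relative to threshold."""
--     oversized_count = 0
--     max_frame_size = 0
--     for frame in frames:
--         hex_data = frame.get("data", "")
--         fsize = len(hex_data) // 2  # hex pairs -> bytes
--         if fsize > max_frame_size:
--             max_frame_size = fsize
--         if fsize > threshold:
--             oversized_count += 1
--     return oversized_count, max_frame_size
-- ===== SOURCE B (Python) =====
-- def analyze_frames(frames, threshold):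
--     """Scan frames and return (oversized_count, max_frame_size) relative to threshold."""
--     sizes = sorted(len(f.get("data", "")) // 2 for f in frames)
--     n = len(sizes)
--     max_frame_size = sizes[n - 1] if n else 0
--     # binary search for the first index whose size exceeds the threshold
--     lo, hi = 0, n
--     while lo < hi:
--         mid = (lo + hi) // 2
--         if sizes[mid] > threshold:
--             hi = mid
--         else:
--             lo = mid + 1
--     return n - lo, max_frame_size
-- ===== Notes on version B (the rewrite author's own statement) =====
-- stated objective: alternative
-- what changed: Replaced A's single fused loop with two accumulators by sort-then-query: build the sorted list of frame sizes, read the max as its last element, and obtain the oversized count by a hand-written binary search for the first size exceeding the threshold.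
import Mathlib
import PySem

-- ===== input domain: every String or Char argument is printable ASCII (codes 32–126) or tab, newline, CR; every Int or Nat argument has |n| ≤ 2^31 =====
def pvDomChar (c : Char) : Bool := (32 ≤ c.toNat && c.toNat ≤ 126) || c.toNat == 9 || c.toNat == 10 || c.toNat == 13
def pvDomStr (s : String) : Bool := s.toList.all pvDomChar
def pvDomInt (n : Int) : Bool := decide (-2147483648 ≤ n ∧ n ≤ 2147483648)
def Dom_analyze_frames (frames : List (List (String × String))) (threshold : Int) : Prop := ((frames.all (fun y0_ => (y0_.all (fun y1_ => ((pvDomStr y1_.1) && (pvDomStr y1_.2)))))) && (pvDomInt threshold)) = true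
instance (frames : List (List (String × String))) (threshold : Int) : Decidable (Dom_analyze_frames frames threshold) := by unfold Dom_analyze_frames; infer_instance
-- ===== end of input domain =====

-- B replaces A's fused two-accumulator loop by sort-then-query: max = last of the sorted sizes, oversized count via binary search (alternative algorithm, O(n log n)).

-- ===== PORT A =====
def analyze_frames (frames : List (List (String × String))) (threshold : Int) : Int × Int :=
  let st := frames.foldl (fun (acc : Int × Int) frame =>
    let hex_data := (PySem.Dict.mk frame).getD "data" ""
    let fsize := PySem.Int.floordiv (PySem.Str.len hex_data) 2
    let max_frame_size := if fsize > acc.2 then fsize else acc.2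
    let oversized_count := if fsize > threshold then acc.1 + 1 else acc.1
    (oversized_count, max_frame_size)) (0, 0)
  (st.1, st.2)

-- ===== PORT B =====
-- binary search loop of Source B: first index in the sorted list whose element exceeds t
-- (sizes[mid] is in range whenever lo < hi ≤ length, so getD is exact there)
-- the while-loop runs on a structural counter: each step shrinks hi - lo by ≥ 1,
-- so fuel = initial hi - lo (= n at the call site) always suffices
def bsLoop (xs : List Int) (t : Int) : Nat → Nat → Nat → Nat
  | 0, lo, _hi => lo
  | fuel + 1, lo, hi =>
    if lo < hi then
      let mid := (lo + hi) / 2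
      if xs.getD mid 0 > t then bsLoop xs t fuel lo mid else bsLoop xs t fuel (mid + 1) hi
    else lo

def analyze_frames_alt (frames : List (List (String × String))) (threshold : Int) : Int × Int :=
  let sizes := PySem.List.sorted (frames.map (fun f =>
    PySem.Int.floordiv (PySem.Str.len ((PySem.Dict.mk f).getD "data" "")) 2)) (fun x => x)
  let n := sizes.length
  let max_frame_size := if n ≠ 0 then sizes.getD (n - 1) 0 else 0
  let lo := bsLoop sizes threshold n 0 n
  ((n : Int) - (lo : Int), max_frame_size)

-- ===== PRECONDITION & SPEC =====
def Spec_analyze_frames (frames : List (List (String × String))) (threshold : Int) (out : Int × Int) : Prop := out = analyze_frames_alt frames threshold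
instance (frames : List (List (String × String))) (threshold : Int) (out : Int × Int) : Decidable (Spec_analyze_frames frames threshold out) := by unfold Spec_analyze_frames; infer_instance

-- ===== CLAIM (what is proved, stated in full; the proofs are below) =====
def Claim_equal_analyze_frames : Prop := ∀ (frames : List (List (String × String))) (threshold : Int), Dom_analyze_frames frames threshold → Spec_analyze_frames frames threshold (analyze_frames frames threshold)

-- ===== LEMMAS AND PROOFS =====

def pvSize (f : List (String × String)) : Int :=
  PySem.Int.floordiv (PySem.Str.len ((PySem.Dict.mk f).getD "data" "")) 2

theorem pvSize_nonneg (f : List (String × String)) : 0 ≤ pvSize f := by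
  unfold pvSize
  rw [PySem.Int.floordiv_eq_ediv_of_pos (by omega)]
  have h : 0 ≤ PySem.Str.len ((PySem.Dict.mk f).getD "data" "") := by
    simp [PySem.Str.len_eq]
  omega

-- A's fused loop, characterised as a count plus a running max
theorem analyze_frames_foldl (frames : List (List (String × String))) (threshold c m : Int) :
    frames.foldl (fun (acc : Int × Int) frame =>
      let hex_data := (PySem.Dict.mk frame).getD "data" ""
      let fsize := PySem.Int.floordiv (PySem.Str.len hex_data) 2
      let max_frame_size := if fsize > acc.2 then fsize else acc.2
      let oversized_count := if fsize > threshold then acc.1 + 1 else acc.1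
      (oversized_count, max_frame_size)) (c, m)
    = (c + ((frames.map pvSize).countP (fun s => s > threshold) : Int),
       (frames.map pvSize).foldl max m) := by
  induction frames generalizing c m with
  | nil => simp
  | cons f t ih =>
    simp only [List.foldl_cons, List.map_cons, List.countP_cons]
    rw [ih]
    have hp : PySem.Int.floordiv (PySem.Str.len ((PySem.Dict.mk f).getD "data" "")) 2 = pvSize f := rfl
    rw [hp, Prod.mk.injEq]
    refine ⟨?_, ?_⟩
    · by_cases h : pvSize f > threshold <;> simp [h, add_comm, add_assoc]
    · congr 1
      split_ifs with h <;> omega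

theorem foldl_max_mem (xs : List Int) (a : Int) : xs.foldl max a = a ∨ xs.foldl max a ∈ xs := by
  induction xs generalizing a with
  | nil => left; rfl
  | cons x t ih =>
    simp only [List.foldl_cons]
    rcases ih (max a x) with h | h
    · rw [h]
      rcases le_total a x with hx | hx
      · right; simp [max_eq_right hx]
      · left; exact max_eq_left hx
    · right; exact List.mem_cons_of_mem _ h

-- the binary search of Source B returns the first index whose element exceeds t
theorem bsLoop_spec (xs : List Int) (t : Int) (fuel lo hi : Nat) (hfuel : hi - lo ≤ fuel)
    (hmono : ∀ p q : Nat, ∀ _hpq : p ≤ q, ∀ hq : q < xs.length, xs[p]'(by omega) ≤ xs[q])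
    (hlo : ∀ j : Nat, ∀ hj : j < xs.length, j < lo → xs[j] ≤ t)
    (hhi : ∀ j : Nat, ∀ hj : j < xs.length, hi ≤ j → t < xs[j])
    (h1 : lo ≤ hi) (h2 : hi ≤ xs.length) :
    lo ≤ bsLoop xs t fuel lo hi ∧ bsLoop xs t fuel lo hi ≤ hi ∧
    (∀ j : Nat, ∀ hj : j < xs.length, j < bsLoop xs t fuel lo hi → xs[j] ≤ t) ∧
    (∀ j : Nat, ∀ hj : j < xs.length, bsLoop xs t fuel lo hi ≤ j → t < xs[j]) := by
  induction fuel generalizing lo hi with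
  | zero =>
    have hle : lo = hi := by omega
    subst hle
    exact ⟨le_refl _, le_refl _, hlo, fun j hj hje => hhi j hj hje⟩
  | succ fuel ih =>
    rw [bsLoop]
    by_cases h : lo < hi
    · simp only [if_pos h]
      by_cases hgt : xs.getD ((lo + hi) / 2) 0 > t
      · simp only [if_pos hgt]
        have hmid : (lo + hi) / 2 < xs.length := by omega
        have hget : xs.getD ((lo + hi) / 2) 0 = xs[(lo + hi) / 2] := List.getD_eq_getElem xs 0 hmid
        have hhi' : ∀ j : Nat, ∀ hj : j < xs.length, (lo + hi) / 2 ≤ j → t < xs[j] := by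
          intro j hj hje
          calc t < xs[(lo + hi) / 2] := by rw [← hget]; exact hgt
            _ ≤ xs[j] := hmono ((lo + hi) / 2) j hje hj
        have := ih lo ((lo + hi) / 2) (by omega) hmono hlo hhi' (by omega) (by omega)
        exact ⟨this.1, by omega, this.2.2.1, this.2.2.2⟩
      · simp only [if_neg hgt]
        have hmid : (lo + hi) / 2 < xs.length := by omega
        have hget : xs.getD ((lo + hi) / 2) 0 = xs[(lo + hi) / 2] := List.getD_eq_getElem xs 0 hmid
        have hlo' : ∀ j : Nat, ∀ hj : j < xs.length, j < (lo + hi) / 2 + 1 → xs[j] ≤ t := by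
          intro j hj hje
          by_cases hjlo : j < lo
          · exact hlo j hj hjlo
          · calc xs[j] ≤ xs[(lo + hi) / 2] := hmono j ((lo + hi) / 2) (by omega) hmid
              _ ≤ t := by rw [← hget] at *; omega
        have := ih ((lo + hi) / 2 + 1) hi (by omega) hmono hlo' hhi (by omega) (by omega)
        exact ⟨by omega, this.2.1, this.2.2.1, this.2.2.2⟩
    · simp only [if_neg h]
      exact ⟨le_refl _, by omega, hlo, fun j hj hje => hhi j hj (by omega)⟩

-- count of elements > t in a list split at the first exceeding index
theorem countP_of_split (xs : List Int) (t : Int) (r : Nat) (hr : r ≤ xs.length)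
    (hle : ∀ j : Nat, ∀ hj : j < xs.length, j < r → xs[j] ≤ t)
    (hgt : ∀ j : Nat, ∀ hj : j < xs.length, r ≤ j → t < xs[j]) :
    xs.countP (fun s => s > t) = xs.length - r := by
  conv_lhs => rw [← List.take_append_drop r xs]
  rw [List.countP_append]
  have h1 : (xs.take r).countP (fun s => s > t) = 0 := by
    rw [List.countP_eq_zero]
    intro a ha
    rcases List.mem_iff_getElem.mp ha with ⟨j, hj, rfl⟩
    have hjr : j < r := by
      simp [List.length_take] at hj; omega
    rw [List.getElem_take]
    have := hle j (by omega) hjr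
    simpa using this
  have h2 : (xs.drop r).countP (fun s => s > t) = (xs.drop r).length := by
    rw [List.countP_eq_length]
    intro a ha
    rcases List.mem_iff_getElem.mp ha with ⟨j, hj, rfl⟩
    rw [List.getElem_drop]
    have := hgt (r + j) (by simp at hj; omega) (by omega)
    simpa using this
  rw [h1, h2]
  simp

-- ===== VERDICT (by name: the statement is the Claim_ definition above) =====
theorem analyze_frames_spec : Claim_equal_analyze_frames := by
  intro frames threshold _
  unfold Spec_analyze_frames analyze_frames analyze_frames_alt
  simp only []
  rw [analyze_frames_foldl]
  have hmap : (frames.map (fun f =>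
      PySem.Int.floordiv (PySem.Str.len ((PySem.Dict.mk f).getD "data" "")) 2))
      = frames.map pvSize := rfl
  rw [hmap, zero_add]
  set xs := frames.map pvSize with hxs
  set ss := PySem.List.sorted xs (fun x => x) with hss
  have hperm : ss.Perm xs := PySem.List.sorted_perm xs (fun x => x) false
  have hpw : ss.Pairwise (fun a b => a ≤ b) := by
    have := PySem.List.sorted_pairwise xs (fun x => x)
    simpa using this
  have hmono : ∀ p q : Nat, ∀ _hpq : p ≤ q, ∀ hq : q < ss.length, ss[p]'(by omega) ≤ ss[q] := by
    intro p q hpq hq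
    rcases Nat.lt_or_ge p q with hlt | hge
    · exact (List.pairwise_iff_getElem.mp hpw) p q (by omega) hq hlt
    · have : p = q := by omega
      subst this; exact le_refl _
  have hspec := bsLoop_spec ss threshold ss.length 0 ss.length (by omega) hmono
    (by intro j hj hc; omega) (by intro j hj hc; omega) (by omega) (le_refl _)
  set r := bsLoop ss threshold ss.length 0 ss.length with hr
  have hcount : ss.countP (fun s => s > threshold) = ss.length - r :=
    countP_of_split ss threshold r hspec.2.1 hspec.2.2.1 hspec.2.2.2
  have hcount' : xs.countP (fun s => s > threshold) = ss.length - r := by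
    rw [← hperm.countP_eq]; exact hcount
  refine Prod.ext ?_ ?_
  · show ((xs.countP (fun s => s > threshold) : Int)) = (ss.length : Int) - (r : Int)
    rw [hcount']
    have := hspec.2.1
    push_cast [Nat.cast_sub this]
    ring
  · -- max side: foldl max 0 xs equals the last element of ss (or 0 when empty)
    show xs.foldl max 0 = if ss.length ≠ 0 then ss.getD (ss.length - 1) 0 else 0
    have hnonneg : ∀ y ∈ xs, 0 ≤ y := by
      intro y hy
      rcases List.mem_map.mp hy with ⟨f, _, rfl⟩
      exact pvSize_nonneg f
    rcases Nat.eq_zero_or_pos ss.length with hz | hp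
    · have hxnil : xs = [] := by
        have := hperm.length_eq
        exact List.eq_nil_of_length_eq_zero (by omega)
      simp [hxnil, hz]
    · have hlast : ss.length - 1 < ss.length := by omega
      set L := ss[ss.length - 1]'hlast with hL
      have hifval : (if ss.length ≠ 0 then ss.getD (ss.length - 1) 0 else 0) = L := by
        rw [if_pos (by omega)]
        exact List.getD_eq_getElem ss 0 hlast
      rw [hifval]
      have hLmem : L ∈ xs := hperm.mem_iff.mp (List.getElem_mem hlast)
      have hub : ∀ y ∈ xs, y ≤ L := by
        intro y hy
        rcases List.mem_iff_getElem.mp (hperm.mem_iff.mpr hy) with ⟨j, hj, rfl⟩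
        exact hmono j (ss.length - 1) (by omega) hlast
      have hfm := PySem.List.le_foldl_max xs (0 : Int)
      rcases foldl_max_mem xs 0 with hcase | hcase
      · have hL0 : L ≤ 0 := by rw [← hcase]; exact hfm.2 L hLmem
        have h0L : 0 ≤ L := hnonneg L hLmem
        omega
      · have h1 : xs.foldl max 0 ≤ L := hub _ hcase
        have h2 : L ≤ xs.foldl max 0 := hfm.2 L hLmem
        omega
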